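-- pv_equiv track=rewrite | github.com/EnterPC-Core/jarvis_portable_2026-03-24 | rating_service.py | _fit_telegram_text
-- ===== SOURCE A (Python) =====
-- from typing import Dict, List, Sequence, Tuple
--
-- MAX_TELEGRAM_TEXT = 3900
--
-- def _fit_telegram_text(lines: Sequence[str], max_len: int = MAX_TELEGRAM_TEXT) -> str:
--     if not lines:
--         return ""
--     result: List[str] = []
--     current_len = 0
--     trimmed = False
--     for line in lines:
--         candidate = line if not result else "\n" + line
--         if current_len + len(candidate) > max_len:
--             trimmed = True
--             break
--         result.append(line)
--         current_len += len(candidate)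
--     if trimmed:
--         suffix = ""
--         if result:
--             suffix = "\n\nПоказана верхняя часть списка. Полный рейтинг лучше выводить страницами."
--             while result and current_len + len(suffix) > max_len:
--                 removed = result.pop()
--                 current_len -= len(removed) + (1 if result else 0)
--         return "\n".join(result) + suffix
--     return "\n".join(result)
-- ===== SOURCE B (Python) =====
-- MAX_TELEGRAM_TEXT = 3900
--
-- def _fit_telegram_text(lines, max_len=MAX_TELEGRAM_TEXT):
--     if not lines:
--         return ""
--     full = "\n".join(lines)
--     if len(full) <= max_len:
--         return full
--     if len(lines[0]) > max_len:
--         # not even the first line fits: nothing can be shown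
--         return ""
--     suffix = "\n\nПоказана верхняя часть списка. Полный рейтинг лучше выводить страницами."
--     budget = max_len - len(suffix)
--     kept = []
--     running = 0
--     for line in lines:
--         add = len(line) + (1 if kept else 0)
--         if running + add > budget:
--             break
--         kept.append(line)
--         running += add
--     return "\n".join(kept) + suffix
-- ===== Notes on version B (the rewrite author's own statement) =====
-- stated objective: simpler
-- what changed: A fills forward to max_len and then pops lines off the back until the trim-notice suffix fits; B checks the whole join once and otherwise does a single forward pass with the suffix already subtracted from the budget, so the pop-back loop disappears.
import Mathlib
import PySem

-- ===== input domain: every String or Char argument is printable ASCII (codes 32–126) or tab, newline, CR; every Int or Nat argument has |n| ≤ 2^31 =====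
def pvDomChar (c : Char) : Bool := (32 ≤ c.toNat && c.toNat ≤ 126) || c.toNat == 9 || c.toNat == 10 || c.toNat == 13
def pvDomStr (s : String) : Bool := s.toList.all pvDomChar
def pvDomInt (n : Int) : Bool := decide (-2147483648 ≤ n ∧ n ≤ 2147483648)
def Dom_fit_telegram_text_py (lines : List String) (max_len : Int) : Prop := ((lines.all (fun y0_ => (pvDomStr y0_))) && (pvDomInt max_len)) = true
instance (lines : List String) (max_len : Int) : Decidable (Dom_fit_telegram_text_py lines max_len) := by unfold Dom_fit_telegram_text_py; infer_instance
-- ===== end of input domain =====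

-- B replaces A's fill-forward-then-pop-back pair of loops by one whole-join check plus a single
-- forward pass with the trim-suffix pre-subtracted from the budget (objective: simpler).


-- ===== PORT A =====
-- the trim-notice literal of A
def pvSuffixA : String := "\n\nПоказана верхняя часть списка. Полный рейтинг лучше выводить страницами."

-- A's forward fill loop: state (result, current_len); returns (result, current_len, trimmed)
def pvFillA (max_len : Int) : List String → List String → Int → (List String × Int × Bool)
  | [], res, cur => (res, cur, false)
  | l :: ls, res, cur =>
      let cand := if res.isEmpty then l else "\n" ++ l
      if max_len < cur + PySem.Str.len cand then (res, cur, true)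
      else pvFillA max_len ls (res ++ [l]) (cur + PySem.Str.len cand)

-- A's pop-back while loop: 'while result and current_len + len(suffix) > max_len: …'
def pvPopA (max_len slen : Int) : List String → Int → List String
  | [], _ => []
  | r :: rs, cur =>
      if max_len < cur + slen then
        let removed := (r :: rs).getLast (by simp)
        let res' := (r :: rs).dropLast
        pvPopA max_len slen res' (cur - (PySem.Str.len removed + (if res'.isEmpty then 0 else 1)))
      else r :: rs
  termination_by res => res.length
  decreasing_by simp

def fit_telegram_text_py (lines : List String) (max_len : Int) : String :=
  if lines.isEmpty then "" else
  let st := pvFillA max_len lines [] 0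
  let res := st.1
  let cur := st.2.1
  let trimmed := st.2.2
  if trimmed then
    let suffix := if res.isEmpty then "" else pvSuffixA
    let res2 := if res.isEmpty then res else pvPopA max_len (PySem.Str.len suffix) res cur
    PySem.Str.join "\n" res2 ++ suffix
  else PySem.Str.join "\n" res

-- ===== PORT B =====
def pvSuffixB : String := "\n\nПоказана верхняя часть списка. Полный рейтинг лучше выводить страницами."

-- B's single forward pass under the suffix-reduced budget
def pvKeepB (budget : Int) : List String → List String → Int → List String
  | [], kept, _ => kept
  | l :: ls, kept, running =>
      let add : Int := PySem.Str.len l + (if kept.isEmpty then 0 else 1)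
      if budget < running + add then kept
      else pvKeepB budget ls (kept ++ [l]) (running + add)

def fit_telegram_text_py_alt (lines : List String) (max_len : Int) : String :=
  if lines.isEmpty then "" else
  let full := PySem.Str.join "\n" lines
  if PySem.Str.len full ≤ max_len then full
  else if max_len < PySem.Str.len (lines.headD "") then ""
  else
    let budget := max_len - PySem.Str.len pvSuffixB
    PySem.Str.join "\n" (pvKeepB budget lines [] 0) ++ pvSuffixB

-- ===== PRECONDITION & SPEC =====
def Spec_fit_telegram_text_py (lines : List String) (max_len : Int) (out : String) : Prop := out = fit_telegram_text_py_alt lines max_len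
instance (lines : List String) (max_len : Int) (out : String) : Decidable (Spec_fit_telegram_text_py lines max_len out) := by unfold Spec_fit_telegram_text_py; infer_instance

-- ===== CLAIM (what is proved, stated in full; the proofs are below) =====
def Claim_equal_fit_telegram_text_py : Prop := ∀ (lines : List String) (max_len : Int), Dom_fit_telegram_text_py lines max_len → Spec_fit_telegram_text_py lines max_len (fit_telegram_text_py lines max_len)

-- ===== LEMMAS AND PROOFS =====

-- length of "\n".join, by recursion on the list of lines
def pvJ : List String → Int
  | [] => 0
  | [l] => PySem.Str.len l
  | l :: l2 :: ls => PySem.Str.len l + 1 + pvJ (l2 :: ls)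

theorem pvJ_join (ls : List String) : PySem.Str.len (PySem.Str.join "\n" ls) = pvJ ls := by
  match ls with
  | [] => simp [pvJ, PySem.Str.len_eq, PySem.Str.toList_join, PySem.Chars.join_nil]
  | [l] => simp [pvJ, PySem.Str.len_eq, PySem.Str.toList_join, PySem.Chars.join_singleton]
  | l :: l2 :: ls =>
      have ih := pvJ_join (l2 :: ls)
      have hlt : ("\n" : String).toList = ['\n'] := rfl
      simp only [PySem.Str.len_eq, PySem.Str.toList_join, List.map_cons, hlt] at ih ⊢
      rw [PySem.Chars.join_cons_cons]
      simp only [pvJ, List.length_append, PySem.Str.len_eq, List.length_singleton]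
      push_cast
      rw [ih]

theorem pvJ_append_singleton (xs : List String) (x : String) :
    pvJ (xs ++ [x]) = pvJ xs + PySem.Str.len x + (if xs.isEmpty then 0 else 1) := by
  match xs with
  | [] => simp [pvJ]
  | [l] => simp [pvJ]; ring
  | l :: l2 :: ls =>
      have ih := pvJ_append_singleton (l2 :: ls) x
      simp only [List.cons_append, pvJ] at ih ⊢
      rw [ih]; simp; ring

theorem pvJ_le_append (xs ys : List String) : pvJ xs ≤ pvJ (xs ++ ys) := by
  induction ys using List.reverseRecOn with
  | nil => simp
  | append_singleton ys y ih =>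
      have hy : (0:Int) ≤ PySem.Str.len y := by rw [PySem.Str.len_eq]; positivity
      rw [← List.append_assoc, pvJ_append_singleton]
      split_ifs <;> omega

-- candidate length in A's loop
theorem pvCandLen (res : List String) (l : String) :
    PySem.Str.len (if res.isEmpty then l else "\n" ++ l)
      = PySem.Str.len l + (if res.isEmpty then 0 else 1) := by
  split_ifs with h
  · ring
  · rw [PySem.Str.len_append]; simp [PySem.Str.len_eq]; ring

-- F1: A's fill produces the same list as B's keep loop (same budget)
theorem pvFill_fst (b : Int) (ls res : List String) (cur : Int) :
    (pvFillA b ls res cur).1 = pvKeepB b ls res cur := by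
  induction ls generalizing res cur with
  | nil => simp [pvFillA, pvKeepB]
  | cons l ls ih =>
      simp only [pvFillA, pvKeepB, pvCandLen res l]
      by_cases h : b < cur + (PySem.Str.len l + if res.isEmpty then (0:Int) else 1)
      · rw [if_pos h, if_pos h]
      · rw [if_neg h, if_neg h]; exact ih _ _

-- F2: the returned current_len is the join-length of the returned list
theorem pvFill_len (b : Int) (ls res : List String) (cur : Int) (hc : cur = pvJ res) :
    (pvFillA b ls res cur).2.1 = pvJ (pvFillA b ls res cur).1 := by
  induction ls generalizing res cur with
  | nil => simpa [pvFillA] using hc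
  | cons l ls ih =>
      simp only [pvFillA, pvCandLen res l]
      by_cases h : b < cur + (PySem.Str.len l + if res.isEmpty then (0:Int) else 1)
      · rw [if_pos h]; simpa using hc
      · rw [if_neg h]
        exact ih _ _ (by rw [pvJ_append_singleton, hc]; ring)

-- F8: untrimmed means everything was taken
theorem pvFill_untrimmed (b : Int) (ls res : List String) (cur : Int)
    (h : (pvFillA b ls res cur).2.2 = false) : (pvFillA b ls res cur).1 = res ++ ls := by
  induction ls generalizing res cur with
  | nil => simp [pvFillA]
  | cons l ls ih =>
      simp only [pvFillA, pvCandLen res l] at h ⊢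
      by_cases hb : b < cur + (PySem.Str.len l + if res.isEmpty then (0:Int) else 1)
      · rw [if_pos hb] at h; simp at h
      · rw [if_neg hb] at h ⊢; rw [ih _ _ h]; simp

-- F3: trimmed iff the whole join does not fit (for a run started in invariant state)
theorem pvFill_trimmed_iff (b : Int) (ls res : List String) (cur : Int)
    (hc : cur = pvJ res) (hb : res = [] ∨ cur ≤ b) :
    (pvFillA b ls res cur).2.2 = false ↔ (pvJ (res ++ ls) ≤ b ∨ (res = [] ∧ ls = [])) := by
  induction ls generalizing res cur with
  | nil =>
      simp only [pvFillA, List.append_nil]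
      constructor
      · intro _
        rcases hb with h | h
        · exact Or.inr (by simp [h])
        · exact Or.inl (hc ▸ h)
      · intro _
        simp
  | cons l ls ih =>
      simp only [pvFillA, pvCandLen res l]
      by_cases h : b < cur + (PySem.Str.len l + if res.isEmpty then (0:Int) else 1)
      · rw [if_pos h]
        have hfalse : ¬ (pvJ (res ++ l :: ls) ≤ b ∨ (res = [] ∧ l :: ls = [])) := by
          have h1 : pvJ (res ++ [l]) ≤ pvJ (res ++ l :: ls) := by
            have := pvJ_le_append (res ++ [l]) ls
            simpa using this
          have h2 : pvJ (res ++ [l]) = pvJ res + PySem.Str.len l + (if res.isEmpty then 0 else 1) :=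
            pvJ_append_singleton res l
          rintro (h' | ⟨_, h4⟩)
          · linarith
          · simp at h4
        constructor
        · intro hcon; simp at hcon
        · intro h'; exact absurd h' hfalse
      · rw [if_neg h]
        rw [ih (res ++ [l]) _ (by rw [pvJ_append_singleton, hc]; ring) (Or.inr (not_lt.mp h))]
        constructor
        · rintro (h' | ⟨h1, _⟩)
          · exact Or.inl (by simpa using h')
          · simp at h1
        · rintro (h' | ⟨h1, h2⟩)
          · exact Or.inl (by simpa using h')
          · simp at h2
        
-- the accumulator is a prefix of keep's result
theorem pvKeep_acc_prefix (b : Int) (ls res : List String) (cur : Int) :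
    res <+: pvKeepB b ls res cur := by
  induction ls generalizing res cur with
  | nil => simp [pvKeepB]
  | cons l ls ih =>
      simp only [pvKeepB]
      by_cases h : b < cur + (PySem.Str.len l + if res.isEmpty then (0:Int) else 1)
      · rw [if_pos h]
      · rw [if_neg h]
        exact List.IsPrefix.trans (by simp) (ih _ _)

-- F5: a smaller budget keeps a prefix of what a bigger budget keeps
theorem pvKeep_mono (b b' : Int) (hb : b' ≤ b) (ls res : List String) (cur : Int) :
    pvKeepB b' ls res cur <+: pvKeepB b ls res cur := by
  induction ls generalizing res cur with
  | nil => simp [pvKeepB]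
  | cons l ls ih =>
      by_cases h2 : b' < cur + (PySem.Str.len l + if res.isEmpty then (0:Int) else 1)
      · have hstop : pvKeepB b' (l :: ls) res cur = res := by
          simp only [pvKeepB]; rw [if_pos h2]
        rw [hstop]
        exact pvKeep_acc_prefix b (l :: ls) res cur
      · have h1 : ¬ b < cur + (PySem.Str.len l + if res.isEmpty then (0:Int) else 1) := by omega
        simp only [pvKeepB]
        rw [if_neg h2, if_neg h1]
        exact ih _ _

-- F4: keep's result is empty or its join fits the budget
theorem pvKeep_fits (b : Int) (ls res : List String) (cur : Int)
    (hc : cur = pvJ res) (hb : res = [] ∨ cur ≤ b) :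
    pvKeepB b ls res cur = [] ∨ pvJ (pvKeepB b ls res cur) ≤ b := by
  induction ls generalizing res cur with
  | nil =>
      simp only [pvKeepB]
      rcases hb with h | h
      · exact Or.inl h
      · exact Or.inr (hc ▸ h)
  | cons l ls ih =>
      simp only [pvKeepB]
      by_cases h : b < cur + (PySem.Str.len l + if res.isEmpty then (0:Int) else 1)
      · rw [if_pos h]
        rcases hb with h' | h'
        · exact Or.inl h'
        · exact Or.inr (hc ▸ h')
      · rw [if_neg h]
        exact ih _ _ (by rw [pvJ_append_singleton, hc]; ring) (Or.inr (not_lt.mp h))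

-- F6: any strictly longer prefix of the big-budget result overflows the small budget
theorem pvKeep_maximal (b b' : Int) (hbb : b' ≤ b) (ls res : List String) (cur : Int)
    (hc : cur = pvJ res) (pf : List String)
    (hpf : pf <+: pvKeepB b ls res cur)
    (hlen : (pvKeepB b' ls res cur).length < pf.length) : b' < pvJ pf := by
  induction ls generalizing res cur pf with
  | nil =>
      simp only [pvKeepB] at hpf hlen
      exact absurd hpf.length_le (by omega)
  | cons l ls ih =>
      by_cases h1 : b < cur + (PySem.Str.len l + if res.isEmpty then (0:Int) else 1)
      · have h2 : b' < cur + (PySem.Str.len l + if res.isEmpty then (0:Int) else 1) := by omega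
        simp only [pvKeepB] at hpf hlen
        rw [if_pos h1] at hpf
        rw [if_pos h2] at hlen
        exact absurd hpf.length_le (by omega)
      · by_cases h2 : b' < cur + (PySem.Str.len l + if res.isEmpty then (0:Int) else 1)
        · -- big budget continues, small budget stopped at res
          simp only [pvKeepB] at hpf hlen
          rw [if_neg h1] at hpf
          rw [if_pos h2] at hlen
          have hres : (res ++ [l]) <+: pvKeepB b ls (res ++ [l])
              (cur + (PySem.Str.len l + if res.isEmpty then 0 else 1)) :=
            pvKeep_acc_prefix _ _ _ _
          rcases List.prefix_or_prefix_of_prefix hres hpf with h3 | h3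
          · obtain ⟨t, ht⟩ := h3
            have hmono := pvJ_le_append (res ++ [l]) t
            rw [ht] at hmono
            have h4 : pvJ (res ++ [l]) = pvJ res + PySem.Str.len l + (if res.isEmpty then 0 else 1) :=
              pvJ_append_singleton res l
            linarith
          · have hpfeq : pf = res ++ [l] :=
              List.IsPrefix.eq_of_length_le h3 (by simp; omega)
            have h4 : pvJ (res ++ [l]) = pvJ res + PySem.Str.len l + (if res.isEmpty then 0 else 1) :=
              pvJ_append_singleton res l
            rw [hpfeq]
            linarith
        · simp only [pvKeepB] at hpf hlen
          rw [if_neg h1] at hpf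
          rw [if_neg h2] at hlen
          exact ih _ _ (by rw [pvJ_append_singleton, hc]; ring) pf hpf hlen

-- prefix survives dropLast when strictly shorter
theorem pvPrefix_dropLast {α : Type} (P R : List α) (h : P <+: R) (hl : P.length < R.length) :
    P <+: R.dropLast := by
  obtain ⟨t, rfl⟩ := h
  have ht : t ≠ [] := by
    intro h'
    subst h'
    simp at hl
  rw [List.dropLast_append_of_ne_nil ht]
  exact List.prefix_append _ _

-- F7: the pop-back loop lands exactly on the maximal fitting prefix P
theorem pvPop_spec (b s : Int) (R P : List String)
    (hP : P <+: R)
    (hmax : ∀ pf, pf <+: R → P.length < pf.length → b - s < pvJ pf)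
    (hfit : P = [] ∨ pvJ P ≤ b - s) :
    pvPopA b s R (pvJ R) = P := by
  by_cases hR : R = []
  · subst hR
    have := hP.length_le
    simp at this
    simp [pvPopA, this]
  · obtain ⟨r, rs, hrr⟩ := List.exists_cons_of_ne_nil hR
    subst hrr
    by_cases hPR : P = r :: rs
    · subst hPR
      have h1 : pvJ (r :: rs) ≤ b - s := by
        rcases hfit with h | h
        · simp at h
        · exact h
      simp only [pvPopA]
      rw [if_neg (by omega)]
    · have hlt : P.length < (r :: rs).length := by
        rcases Nat.lt_or_ge P.length (r :: rs).length with h | h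
        · exact h
        · exact absurd (List.IsPrefix.eq_of_length_le hP h) hPR
      have hover : b - s < pvJ (r :: rs) := hmax _ (List.prefix_refl _) hlt
      simp only [pvPopA]
      rw [if_pos (by omega)]
      have hsplit : (r :: rs) = (r :: rs).dropLast ++ [(r :: rs).getLast (by simp)] :=
        (List.dropLast_append_getLast (by simp)).symm
      have hs2 : pvJ (r :: rs) = pvJ ((r :: rs).dropLast ++ [(r :: rs).getLast (by simp)]) :=
        congrArg pvJ hsplit
      have hJ : pvJ (r :: rs) - (PySem.Str.len ((r :: rs).getLast (by simp)) +
            (if (r :: rs).dropLast.isEmpty then 0 else 1)) = pvJ ((r :: rs).dropLast) := by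
        rw [hs2, pvJ_append_singleton]
        ring
      rw [hJ]
      have hP' : P <+: (r :: rs).dropLast := pvPrefix_dropLast P _ hP hlt
      have hmax' : ∀ pf, pf <+: (r :: rs).dropLast → P.length < pf.length → b - s < pvJ pf :=
        fun pf h1 h2 => hmax pf (h1.trans (List.dropLast_prefix _)) h2
      exact pvPop_spec b s ((r :: rs).dropLast) P hP' hmax' hfit
  termination_by R.length
  decreasing_by simp [hrr, List.length_dropLast]

-- the suffix constant has nonnegative length (it is a fixed literal)
theorem pvSuffix_len_nonneg : 0 ≤ PySem.Str.len pvSuffixB := by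
  rw [PySem.Str.len_eq]; positivity

-- keep stops immediately when even the first line overflows
theorem pvKeep_first_over (b : Int) (l : String) (ls : List String)
    (h : b < PySem.Str.len l) : pvKeepB b (l :: ls) [] 0 = [] := by
  simp only [pvKeepB]
  rw [if_pos (by simpa using h)]

-- keep never loses its accumulator
theorem pvKeep_ne_nil (b : Int) (ls res : List String) (cur : Int) (h : res ≠ []) :
    pvKeepB b ls res cur ≠ [] := by
  intro hcon
  have h2 := pvKeep_acc_prefix b ls res cur
  rw [hcon] at h2
  exact h (List.prefix_nil.mp h2)

-- keep takes at least the first line when it fits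
theorem pvKeep_first_fits (b : Int) (l : String) (ls : List String)
    (h : PySem.Str.len l ≤ b) : pvKeepB b (l :: ls) [] 0 ≠ [] := by
  simp only [pvKeepB]
  rw [if_neg (by simpa using not_lt.mpr h)]
  exact pvKeep_ne_nil _ _ _ _ (by simp)

-- ===== VERDICT (by name: the statement is the Claim_ definition above) =====
theorem fit_telegram_text_py_spec : Claim_equal_fit_telegram_text_py := by
  intro lines max_len _
  show fit_telegram_text_py lines max_len = fit_telegram_text_py_alt lines max_len
  match lines with
  | [] => rfl
  | l0 :: rest =>
    have hinv0 : (0:Int) = pvJ ([] : List String) := by simp [pvJ]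
    have htr := pvFill_trimmed_iff max_len (l0 :: rest) [] 0 hinv0 (Or.inl rfl)
    simp only [List.nil_append] at htr
    have hfull : PySem.Str.len (PySem.Str.join "\n" (l0 :: rest)) = pvJ (l0 :: rest) := pvJ_join (l0 :: rest)
    have hsab : pvSuffixA = pvSuffixB := rfl
    by_cases hfit : pvJ (l0 :: rest) ≤ max_len
    · -- untrimmed: both return the full join
      have ht : (pvFillA max_len (l0 :: rest) [] 0).2.2 = false := htr.mpr (Or.inl hfit)
      have hA : fit_telegram_text_py (l0 :: rest) max_len = PySem.Str.join "\n" (l0 :: rest) := by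
        simp only [fit_telegram_text_py, List.isEmpty_cons, Bool.false_eq_true, if_false]
        rw [if_neg (by simp [ht])]
        rw [pvFill_untrimmed max_len (l0 :: rest) [] 0 ht, List.nil_append]
      have hB : fit_telegram_text_py_alt (l0 :: rest) max_len = PySem.Str.join "\n" (l0 :: rest) := by
        simp only [fit_telegram_text_py_alt, List.isEmpty_cons, Bool.false_eq_true, if_false]
        rw [if_pos (by rw [hfull]; exact hfit)]
      rw [hA, hB]
    · -- trimmed
      have ht : (pvFillA max_len (l0 :: rest) [] 0).2.2 = true := by
        rcases Bool.eq_false_or_eq_true (pvFillA max_len (l0 :: rest) [] 0).2.2 with h | h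
        · exact h
        · exact absurd (htr.mp h) (by simp [hfit])
      have hres : (pvFillA max_len (l0 :: rest) [] 0).1 = pvKeepB max_len (l0 :: rest) [] 0 :=
        pvFill_fst max_len (l0 :: rest) [] 0
      by_cases hfirst : max_len < PySem.Str.len l0
      · -- first line alone too long: both return ""
        have hempty : (pvFillA max_len (l0 :: rest) [] 0).1 = [] := by
          rw [hres]
          exact pvKeep_first_over max_len l0 rest hfirst
        have hA : fit_telegram_text_py (l0 :: rest) max_len = "" := by
          simp only [fit_telegram_text_py, List.isEmpty_cons, Bool.false_eq_true, if_false]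
          rw [if_pos ht, hempty]
          rfl
        have hB : fit_telegram_text_py_alt (l0 :: rest) max_len = "" := by
          simp only [fit_telegram_text_py_alt, List.isEmpty_cons, Bool.false_eq_true, if_false,
            List.headD_cons]
          rw [if_neg (by rw [hfull]; exact hfit)]
          rw [if_pos hfirst]
        rw [hA, hB]
      · rw [not_lt] at hfirst
        have hne : (pvFillA max_len (l0 :: rest) [] 0).1 ≠ [] := by
          rw [hres]
          exact pvKeep_first_fits max_len l0 rest hfirst
        have hcur : (pvFillA max_len (l0 :: rest) [] 0).2.1 = pvJ (pvFillA max_len (l0 :: rest) [] 0).1 :=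
          pvFill_len max_len (l0 :: rest) [] 0 hinv0
        have hsnn : 0 ≤ PySem.Str.len pvSuffixB := pvSuffix_len_nonneg
        have hpop : pvPopA max_len (PySem.Str.len pvSuffixB) (pvKeepB max_len (l0 :: rest) [] 0)
            (pvJ (pvKeepB max_len (l0 :: rest) [] 0)) = pvKeepB (max_len - PySem.Str.len pvSuffixB) (l0 :: rest) [] 0 := by
          apply pvPop_spec
          · exact pvKeep_mono max_len (max_len - PySem.Str.len pvSuffixB) (by linarith) (l0 :: rest) [] 0
          · intro pf hpf hlen
            exact pvKeep_maximal max_len (max_len - PySem.Str.len pvSuffixB) (by linarith)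
              (l0 :: rest) [] 0 hinv0 pf hpf hlen
          · exact pvKeep_fits (max_len - PySem.Str.len pvSuffixB) (l0 :: rest) [] 0 hinv0 (Or.inl rfl)
        have hA : fit_telegram_text_py (l0 :: rest) max_len =
            PySem.Str.join "\n" (pvKeepB (max_len - PySem.Str.len pvSuffixB) (l0 :: rest) [] 0) ++ pvSuffixA := by
          simp only [fit_telegram_text_py, List.isEmpty_cons, Bool.false_eq_true, if_false]
          rw [if_pos ht]
          rw [if_neg (by simpa using hne), if_neg (by simpa using hne)]
          rw [hcur, hres, hsab, hpop]
        have hB : fit_telegram_text_py_alt (l0 :: rest) max_len =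
            PySem.Str.join "\n" (pvKeepB (max_len - PySem.Str.len pvSuffixB) (l0 :: rest) [] 0) ++ pvSuffixB := by
          simp only [fit_telegram_text_py_alt, List.isEmpty_cons, Bool.false_eq_true, if_false,
            List.headD_cons]
          rw [if_neg (by rw [hfull]; exact hfit)]
          rw [if_neg (not_lt.mpr hfirst)]
        rw [hA, hB, hsab]
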